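-- pv_equiv track=rewrite | github.com/siqment/DOLGI | lab№3.py | freq_sort
-- ===== SOURCE A (Python) =====
-- from collections import Counter
--
-- def freq_sort(array):
--     nums = Counter(array)
--
--     inverse_nums = {}
--     for key, value in nums.items():
--         inverse_nums.setdefault(value, list()).append(key)
--     sorted_nums = dict(sorted(inverse_nums.items()))
--     result = []
--     for key, value in sorted_nums.items():
--         for numbers in value:
--             result.extend([numbers for i in range(key)])
--     return result
-- ===== SOURCE B (Python) =====
-- from collections import Counter
--
-- def freq_sort(array):
--     counts = Counter(array)
--     out = []
--     for x in sorted(counts, key=counts.get):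
--         out += [x] * counts[x]
--     return out
-- ===== Notes on version B (the rewrite author's own statement) =====
-- stated objective: idiomatic
-- what changed: Instead of building an inverse frequency->elements dict, sorting its items and flattening group by group, B sorts the distinct elements directly with a stable sort keyed by their count and expands each by repetition.
import Mathlib
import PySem

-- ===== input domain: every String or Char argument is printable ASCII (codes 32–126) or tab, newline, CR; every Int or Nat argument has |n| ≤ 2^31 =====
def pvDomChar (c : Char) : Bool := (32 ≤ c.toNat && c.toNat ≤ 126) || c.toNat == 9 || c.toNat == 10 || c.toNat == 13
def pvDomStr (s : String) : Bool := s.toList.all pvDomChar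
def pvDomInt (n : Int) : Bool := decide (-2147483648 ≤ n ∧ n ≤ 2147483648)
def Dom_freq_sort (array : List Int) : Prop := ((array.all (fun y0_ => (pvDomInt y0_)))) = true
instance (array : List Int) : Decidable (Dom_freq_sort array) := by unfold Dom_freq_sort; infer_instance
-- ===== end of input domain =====

-- B replaces A's inverse frequency->elements grouping dict by a direct stable sort
-- of the distinct elements keyed by their count (idiomatic decomposition, same cost).


-- ===== PORT A =====
-- nums = Counter(array)
-- for key, value in nums.items(): inverse_nums.setdefault(value, list()).append(key)
--   (setdefault-then-append on the mutable list is Dict.modify with default [])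
-- sorted(inverse_nums.items()): dict keys are distinct, so Python's tuple
--   comparison on the items never reaches the second component; ported as a sort
--   keyed by the first component (exact here).
-- result.extend([numbers for i in range(key)])
def freq_sort (array : List Int) : List Int :=
  let nums : PySem.Dict Int Int := array.foldl (fun d x => d.modify x 0 (· + 1)) PySem.Dict.empty
  let inverse_nums : PySem.Dict Int (List Int) :=
    nums.items.foldl (fun d p => d.modify p.2 [] (fun v => v ++ [p.1])) PySem.Dict.empty
  let sorted_nums : PySem.Dict Int (List Int) :=
    PySem.Dict.ofList (PySem.List.sorted inverse_nums.items (fun p => p.1) false)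
  sorted_nums.items.foldl
    (fun result p =>
      p.2.foldl (fun acc numbers => acc ++ (PySem.List.pyRange 0 p.1 1).map (fun _ => numbers)) result)
    []

-- ===== PORT B =====
-- counts = Counter(array); for x in sorted(counts, key=counts.get): out += [x] * counts[x]
def freq_sort_alt (array : List Int) : List Int :=
  let counts : PySem.Dict Int Int := PySem.Dict.counter array
  (PySem.List.sorted counts.keys (fun x => counts.getD x 0) false).foldl
    (fun out x => out ++ PySem.List.pyRepeat [x] (counts.getD x 0)) []

-- ===== PRECONDITION & SPEC =====
def Spec_freq_sort (array : List Int) (out : List Int) : Prop := out = freq_sort_alt array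
instance (array : List Int) (out : List Int) : Decidable (Spec_freq_sort array out) := by unfold Spec_freq_sort; infer_instance

-- ===== CLAIM (what is proved, stated in full; the proofs are below) =====
def Claim_equal_freq_sort : Prop := ∀ (array : List Int), Dom_freq_sort array → Spec_freq_sort array (freq_sort array)

-- ===== LEMMAS AND PROOFS =====

theorem pvInsertBy_eq {α : Type} (before : α → α → Bool) (x : α) (ys : List α) :
    PySem.List.insertBy before x ys =
      ys.takeWhile (fun y => !before x y) ++ x :: ys.dropWhile (fun y => !before x y) := by
  induction ys with
  | nil => simp [PySem.List.insertBy]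
  | cons y ys ih =>
    by_cases h : before x y = true <;>
      simp [PySem.List.insertBy, h, ih, List.takeWhile_cons, List.dropWhile_cons]

theorem pvTakeWhile_nil {α : Type} (p : α → Bool) (l : List α) (h : ∀ a ∈ l, p a = false) :
    l.takeWhile p = [] := by
  cases l with
  | nil => rfl
  | cons a l => simp [List.takeWhile_cons, h a (by simp)]

theorem pvDropWhile_self {α : Type} (p : α → Bool) (l : List α) (h : ∀ a ∈ l, p a = false) :
    l.dropWhile p = l := by
  cases l with
  | nil => rfl
  | cons a l => simp [List.dropWhile_cons, h a (by simp)]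

theorem pvTakeWhile_append_all {α : Type} (p : α → Bool) (l1 l2 : List α)
    (h : ∀ a ∈ l1, p a = true) : (l1 ++ l2).takeWhile p = l1 ++ l2.takeWhile p := by
  induction l1 with
  | nil => simp
  | cons a l ih =>
    simp only [List.cons_append, List.takeWhile_cons, h a (by simp)]
    simp [ih (fun a ha => h a (by simp [ha]))]

theorem pvDropWhile_append_all {α : Type} (p : α → Bool) (l1 l2 : List α)
    (h : ∀ a ∈ l1, p a = true) : (l1 ++ l2).dropWhile p = l2.dropWhile p := by
  induction l1 with
  | nil => simp
  | cons a l ih =>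
    simp only [List.cons_append, List.dropWhile_cons, h a (by simp)]
    simp [ih (fun a ha => h a (by simp [ha]))]

-- takeWhile (key ≤ k) over a bucketed flatMap keeps exactly the buckets with f ≤ k
theorem pvTakeWhile_flatMap (key : Int → Int) (k : Int) (fs : List Int) (g : Int → List Int)
    (hfs : fs.Pairwise (· < ·)) (hg : ∀ f ∈ fs, ∀ y ∈ g f, key y = f) :
    (fs.flatMap g).takeWhile (fun y => !decide (k < key y)) =
      (fs.filter (fun f => !decide (k < f))).flatMap g := by
  induction fs with
  | nil => simp
  | cons f fs ih =>
    rcases List.pairwise_cons.mp hfs with ⟨hall, htail⟩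
    by_cases hk : k < f
    · have hbig : ∀ y ∈ (f :: fs).flatMap g, (fun y => !decide (k < key y)) y = false := by
        intro y hy
        rcases List.mem_flatMap.mp hy with ⟨f', hf', hyf'⟩
        have : key y = f' := hg f' hf' y hyf'
        have : k < key y := by
          rcases List.mem_cons.mp hf' with h | h
          · omega
          · have := hall f' h; omega
        simp [this]
      rw [pvTakeWhile_nil _ _ hbig]
      have : (f :: fs).filter (fun f => !decide (k < f)) = [] := by
        rw [List.filter_eq_nil_iff]
        intro a ha
        rcases List.mem_cons.mp ha with h | h
        · simp [h, hk]
        · have := hall a h; simp; omega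
      rw [this]; simp
    · have hhead : ∀ y ∈ g f, (fun y => !decide (k < key y)) y = true := by
        intro y hy
        have : key y = f := hg f (by simp) y hy
        simp [this]; omega
      rw [List.flatMap_cons, pvTakeWhile_append_all _ _ _ hhead,
        ih htail (fun f' hf' => hg f' (by simp [hf']))]
      have : (f :: fs).filter (fun f => !decide (k < f)) =
          f :: fs.filter (fun f => !decide (k < f)) := by
        simp [List.filter_cons]; omega
      rw [this, List.flatMap_cons]

theorem pvDropWhile_flatMap (key : Int → Int) (k : Int) (fs : List Int) (g : Int → List Int)
    (hfs : fs.Pairwise (· < ·)) (hg : ∀ f ∈ fs, ∀ y ∈ g f, key y = f) :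
    (fs.flatMap g).dropWhile (fun y => !decide (k < key y)) =
      (fs.filter (fun f => decide (k < f))).flatMap g := by
  induction fs with
  | nil => simp
  | cons f fs ih =>
    rcases List.pairwise_cons.mp hfs with ⟨hall, htail⟩
    by_cases hk : k < f
    · have hbig : ∀ y ∈ (f :: fs).flatMap g, (fun y => !decide (k < key y)) y = false := by
        intro y hy
        rcases List.mem_flatMap.mp hy with ⟨f', hf', hyf'⟩
        have : key y = f' := hg f' hf' y hyf'
        have : k < key y := by
          rcases List.mem_cons.mp hf' with h | h
          · omega
          · have := hall f' h; omega
        simp [this]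
      rw [pvDropWhile_self _ _ hbig]
      have : (f :: fs).filter (fun f => decide (k < f)) = f :: fs := by
        rw [List.filter_eq_self]
        intro a ha
        rcases List.mem_cons.mp ha with h | h
        · simp [h, hk]
        · have := hall a h; simp; omega
      rw [this]
    · have hhead : ∀ y ∈ g f, (fun y => !decide (k < key y)) y = true := by
        intro y hy
        have : key y = f := hg f (by simp) y hy
        simp [this]; omega
      rw [List.flatMap_cons, pvDropWhile_append_all _ _ _ hhead,
        ih htail (fun f' hf' => hg f' (by simp [hf']))]
      have : (f :: fs).filter (fun f => decide (k < f)) = fs.filter (fun f => decide (k < f)) := by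
        simp [List.filter_cons]; omega
      rw [this]

-- a strictly increasing list splits at k
theorem pvTrisect (k : Int) (fs : List Int) (hfs : fs.Pairwise (· < ·)) :
    fs = fs.filter (fun f => decide (f < k)) ++ fs.filter (fun f => f == k) ++
      fs.filter (fun f => decide (k < f)) := by
  induction fs with
  | nil => simp
  | cons f fs ih =>
    rcases List.pairwise_cons.mp hfs with ⟨hall, htail⟩
    have e1 : ∀ b ∈ fs, f < b := hall
    rcases lt_trichotomy f k with h | h | h
    · have := ih htail
      simp only [List.filter_cons]
      simp only [show decide (f < k) = true by simp [h],
        show (f == k) = false by simp; omega,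
        show decide (k < f) = false by simp; omega]
      simp only [if_true, Bool.false_eq_true, if_false, List.cons_append]
      rw [← this]
    · have hgt : ∀ b ∈ fs, k < b := by intro b hb; have := e1 b hb; omega
      have f1 : fs.filter (fun f => decide (f < k)) = [] := by
        rw [List.filter_eq_nil_iff]; intro a ha; have := hgt a ha; simp; omega
      have f2 : fs.filter (fun f => f == k) = [] := by
        rw [List.filter_eq_nil_iff]; intro a ha; have := hgt a ha; simp; omega
      have f3 : fs.filter (fun f => decide (k < f)) = fs := by
        rw [List.filter_eq_self]; intro a ha; have := hgt a ha; simp; omega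
      simp only [List.filter_cons]
      simp only [show decide (f < k) = false by simp; omega,
        show (f == k) = true by simp [h],
        show decide (k < f) = false by simp; omega]
      simp [f1, f2, f3, h]
    · have hgt : ∀ b ∈ fs, k < b := by intro b hb; have := e1 b hb; omega
      have f1 : fs.filter (fun f => decide (f < k)) = [] := by
        rw [List.filter_eq_nil_iff]; intro a ha; have := hgt a ha; simp; omega
      have f2 : fs.filter (fun f => f == k) = [] := by
        rw [List.filter_eq_nil_iff]; intro a ha; have := hgt a ha; simp; omega
      have f3 : fs.filter (fun f => decide (k < f)) = fs := by
        rw [List.filter_eq_self]; intro a ha; have := hgt a ha; simp; omega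
      simp only [List.filter_cons]
      simp only [show decide (f < k) = false by simp; omega,
        show (f == k) = false by simp; omega,
        show decide (k < f) = true by simp [h]]
      simp [f1, f2, f3]

-- filter (≤ k) splits into (< k) and (== k) pieces on a strictly increasing list
theorem pvLeSplit (k : Int) (fs : List Int) (hfs : fs.Pairwise (· < ·)) :
    fs.filter (fun f => !decide (k < f)) =
      fs.filter (fun f => decide (f < k)) ++ fs.filter (fun f => f == k) := by
  induction fs with
  | nil => simp
  | cons f fs ih =>
    rcases List.pairwise_cons.mp hfs with ⟨hall, htail⟩
    rcases lt_trichotomy f k with h | h | h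
    · simp only [List.filter_cons]
      simp only [show (!decide (k < f)) = true by simp; omega,
        show decide (f < k) = true by simp [h],
        show (f == k) = false by simp; omega]
      simp [ih htail]
    · have hgt : ∀ b ∈ fs, k < b := by intro b hb; have := hall b hb; omega
      have f1 : fs.filter (fun f => decide (f < k)) = [] := by
        rw [List.filter_eq_nil_iff]; intro a ha; have := hgt a ha; simp; omega
      have f2 : fs.filter (fun f => f == k) = [] := by
        rw [List.filter_eq_nil_iff]; intro a ha; have := hgt a ha; simp; omega
      have f4 : fs.filter (fun f => !decide (k < f)) = [] := by
        rw [List.filter_eq_nil_iff]; intro a ha; have := hgt a ha; simp; omega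
      simp only [List.filter_cons]
      simp only [show (!decide (k < f)) = true by simp; omega,
        show decide (f < k) = false by simp; omega,
        show (f == k) = true by simp [h]]
      simp [f1, f2, f4]
    · have hgt : ∀ b ∈ fs, k < b := by intro b hb; have := hall b hb; omega
      have f1 : fs.filter (fun f => decide (f < k)) = [] := by
        rw [List.filter_eq_nil_iff]; intro a ha; have := hgt a ha; simp; omega
      have f2 : fs.filter (fun f => f == k) = [] := by
        rw [List.filter_eq_nil_iff]; intro a ha; have := hgt a ha; simp; omega
      have f4 : fs.filter (fun f => !decide (k < f)) = [] := by
        rw [List.filter_eq_nil_iff]; intro a ha; have := hgt a ha; simp; omega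
      simp only [List.filter_cons]
      simp only [show (!decide (k < f)) = false by simp [h],
        show decide (f < k) = false by simp; omega,
        show (f == k) = false by simp; omega]
      simp [f1, f2, f4]

theorem pvFilterBeqSingleton (k : Int) (fs : List Int) (hnd : fs.Nodup) (hk : k ∈ fs) :
    fs.filter (fun f => f == k) = [k] := by
  rw [List.filter_beq, hnd.count, if_pos hk, List.replicate_one]

-- sorted distinct keys of m ++ [k]: k slots into its place
theorem pvSortedKeysExt (m : List Int) (k : Int) :
    PySem.List.sorted (PySem.Set.ofList (m ++ [k])) (fun x => x) false =
      (PySem.List.sorted (PySem.Set.ofList m) (fun x => x) false).filter (fun f => decide (f < k))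
      ++ k ::
      (PySem.List.sorted (PySem.Set.ofList m) (fun x => x) false).filter (fun f => decide (k < f)) := by
  set fs := PySem.List.sorted (PySem.Set.ofList m) (fun x => x) false with hfsdef
  have hfs : fs.Pairwise (· < ·) := PySem.List.sorted_ofList_pairwise_lt m
  have hnd : fs.Nodup := ((PySem.List.sorted_perm _ _ _).nodup_iff).mpr (PySem.Set.nodup_ofList m)
  have hmem : ∀ y, y ∈ fs ↔ y ∈ m := by
    intro y
    rw [hfsdef, PySem.List.mem_sorted, PySem.Set.mem_ofList]
  have hofl : PySem.Set.ofList (m ++ [k]) = PySem.Set.add (PySem.Set.ofList m) k := by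
    rw [PySem.Set.ofList_eq_foldl, PySem.Set.ofList_eq_foldl, List.foldl_append]
    simp
  apply PySem.List.sorted_eq_of_perm_of_pairwise_lt
  · -- permutation
    rw [hofl]
    by_cases hk : k ∈ m
    · have hadd : PySem.Set.add (PySem.Set.ofList m) k = PySem.Set.ofList m := by
        unfold PySem.Set.add
        rw [if_pos (by rw [PySem.Set.contains_iff, PySem.Set.mem_ofList]; exact hk)]
      rw [hadd]
      have htr := pvTrisect k fs hfs
      rw [pvFilterBeqSingleton k fs hnd ((hmem k).mpr hk)] at htr
      have heq : fs.filter (fun f => decide (f < k)) ++ k :: fs.filter (fun f => decide (k < f))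
          = fs := by
        conv_rhs => rw [htr]
        simp
      rw [heq]
      exact PySem.List.sorted_perm _ _ _
    · have hadd : PySem.Set.add (PySem.Set.ofList m) k = PySem.Set.ofList m ++ [k] := by
        unfold PySem.Set.add
        rw [if_neg (by rw [PySem.Set.contains_iff, PySem.Set.mem_ofList]; simp [hk])]
      rw [hadd]
      have htr := pvTrisect k fs hfs
      have hf2 : fs.filter (fun f => f == k) = [] := by
        rw [List.filter_eq_nil_iff]
        intro a ha hak
        have : a = k := by simpa using hak
        exact hk (this ▸ (hmem a).mp ha)
      rw [hf2, List.append_nil] at htr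
      have p0 : (fs.filter (fun f => decide (f < k)) ++ k :: fs.filter (fun f => decide (k < f))).Perm
          (k :: (fs.filter (fun f => decide (f < k)) ++ fs.filter (fun f => decide (k < f)))) :=
        List.perm_middle
      rw [← htr] at p0
      exact p0.trans (((PySem.List.sorted_perm _ _ _).cons k).trans
        (List.perm_append_singleton k _).symm)
  · -- strictly increasing
    rw [List.pairwise_append]
    refine ⟨List.Pairwise.sublist List.filter_sublist hfs, ?_, ?_⟩
    · rw [List.pairwise_cons]
      refine ⟨?_, List.Pairwise.sublist List.filter_sublist hfs⟩
      intro b hb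
      have := (List.mem_filter.mp hb).2; simpa using this
    · intro a ha b hb
      have ha' := (List.mem_filter.mp ha).2
      rcases List.mem_cons.mp hb with rfl | hb'
      · simpa using ha'
      · have hb'' := (List.mem_filter.mp hb').2
        simp at ha' hb''; omega

theorem pvFlatMapCongr {α β : Type} (l : List α) (f g : α → List β)
    (h : ∀ a ∈ l, f a = g a) : l.flatMap f = l.flatMap g := by
  induction l with
  | nil => rfl
  | cons a l ih =>
    simp only [List.flatMap_cons, h a (by simp), ih (fun a ha => h a (by simp [ha]))]

-- STABILITY: a stable sort by key is the concatenation, in increasing key order,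
-- of the original sublists of equal key
theorem pvSortedBuckets (l : List Int) (key : Int → Int) :
    PySem.List.sorted l key false =
      (PySem.List.sorted (PySem.Set.ofList (l.map key)) (fun x => x) false).flatMap
        (fun f => l.filter (fun x => key x == f)) := by
  induction l using List.reverseRecOn with
  | nil => simp [PySem.List.sorted]
  | append_singleton l x ih =>
    set k := key x with hk
    set fs := PySem.List.sorted (PySem.Set.ofList (l.map key)) (fun x => x) false with hfsdef
    have hfs : fs.Pairwise (· < ·) := PySem.List.sorted_ofList_pairwise_lt _
    have hmemfs : ∀ y, y ∈ fs ↔ y ∈ l.map key := by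
      intro y; rw [hfsdef, PySem.List.mem_sorted, PySem.Set.mem_ofList]
    have hg : ∀ f ∈ fs, ∀ y ∈ l.filter (fun x => key x == f), key y = f := by
      intro f _ y hy
      simpa using (List.mem_filter.mp hy).2
    -- LHS: insert x into the bucketed sorted l
    have hlhs : PySem.List.sorted (l ++ [x]) key false =
        (fs.filter (fun f => !decide (k < f))).flatMap (fun f => l.filter (fun x => key x == f))
        ++ x ::
        (fs.filter (fun f => decide (k < f))).flatMap (fun f => l.filter (fun x => key x == f)) := by
      rw [PySem.List.sorted_eq_foldl_insertBy, List.foldl_append]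
      rw [← PySem.List.sorted_eq_foldl_insertBy, ih]
      simp only [List.foldl_cons, List.foldl_nil]
      rw [pvInsertBy_eq]
      rw [pvTakeWhile_flatMap key k fs _ hfs hg, pvDropWhile_flatMap key k fs _ hfs hg]
    rw [hlhs]
    -- RHS: the new key list splits around k
    have hmap : (l ++ [x]).map key = l.map key ++ [k] := by simp [hk]
    rw [hmap, pvSortedKeysExt (l.map key) k, ← hfsdef]
    rw [List.flatMap_append, List.flatMap_cons]
    -- groups of l ++ [x]
    have hgrp : ∀ f, (l ++ [x]).filter (fun y => key y == f) =
        l.filter (fun y => key y == f) ++ if k == f then [x] else [] := by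
      intro f
      rw [List.filter_append]
      congr 1
      simp [List.filter_cons, hk.symm]
    have hlt : (fs.filter (fun f => decide (f < k))).flatMap
          (fun f => (l ++ [x]).filter (fun y => key y == f)) =
        (fs.filter (fun f => decide (f < k))).flatMap (fun f => l.filter (fun y => key y == f)) := by
      apply pvFlatMapCongr
      intro f hf
      rw [hgrp f]
      have : (k == f) = false := by
        have := (List.mem_filter.mp hf).2; simp at this ⊢; omega
      rw [this]; simp
    have hgt : (fs.filter (fun f => decide (k < f))).flatMap
          (fun f => (l ++ [x]).filter (fun y => key y == f)) =
        (fs.filter (fun f => decide (k < f))).flatMap (fun f => l.filter (fun y => key y == f)) := by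
      apply pvFlatMapCongr
      intro f hf
      rw [hgrp f]
      have : (k == f) = false := by
        have := (List.mem_filter.mp hf).2; simp at this ⊢; omega
      rw [this]; simp
    rw [hlt, hgt]
    -- the ≤ k part of LHS splits into < k buckets and the k bucket
    rw [pvLeSplit k fs hfs, List.flatMap_append]
    have hmid : (fs.filter (fun f => f == k)).flatMap (fun f => l.filter (fun y => key y == f)) =
        l.filter (fun y => key y == k) := by
      by_cases hkfs : k ∈ fs
      · have hnd : fs.Nodup := ((PySem.List.sorted_perm _ _ _).nodup_iff).mpr
          (PySem.Set.nodup_ofList _)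
        rw [pvFilterBeqSingleton k fs hnd hkfs]
        simp
      · have h1 : fs.filter (fun f => f == k) = [] := by
          rw [List.filter_eq_nil_iff]
          intro a ha hak
          have : a = k := by simpa using hak
          exact hkfs (this ▸ ha)
        have h2 : l.filter (fun y => key y == k) = [] := by
          rw [List.filter_eq_nil_iff]
          intro a ha hak
          have : key a = k := by simpa using hak
          exact hkfs ((hmemfs k).mpr (this ▸ List.mem_map_of_mem ha))
        rw [h1, h2]; simp
    rw [hmid]
    -- assemble
    rw [hgrp k]
    simp

theorem pvLenPyRange (k : Int) : (PySem.List.pyRange 0 k 1).length = k.toNat := by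
  simp [PySem.List.pyRange]; omega

theorem pvMain (array : List Int) : freq_sort array = freq_sort_alt array := by
  simp only [freq_sort, freq_sort_alt]
  rw [← PySem.Dict.counter_eq_foldl]
  set c := PySem.Dict.counter array with hc
  set cnt : Int → Int := fun v => ((array.count v : Int)) with hcnt
  set K := PySem.Set.ofList array with hK
  set grp : Int → List Int := fun f => K.filter (fun x => cnt x == f) with hgrp
  set fs := PySem.List.sorted (PySem.Set.ofList (K.map cnt)) (fun x => x) false with hfs
  set inv := c.items.foldl (fun d p => d.modify p.2 [] (fun v => v ++ [p.1])) PySem.Dict.empty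
    with hinv
  have hitems : c.items = K.map (fun k => (k, cnt k)) := PySem.Dict.items_counter array
  have hfsnd : fs.Nodup := ((PySem.List.sorted_perm _ _ _).nodup_iff).mpr (PySem.Set.nodup_ofList _)
  have hfspw : fs.Pairwise (· < ·) := PySem.List.sorted_ofList_pairwise_lt _
  -- inverse_nums facts
  have F1 : inv.keys = PySem.Set.ofList (K.map cnt) := by
    rw [hinv, PySem.Dict.keys_foldl_modify_key c.items (fun p => p.2) [] (fun d p => fun v => v ++ [p.1])]
    rw [PySem.Dict.keys_empty, PySem.Set.update_nil_left, hitems, List.map_map]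
    rfl
  have F2 : inv.keys.Nodup := by
    rw [hinv]
    apply PySem.Dict.nodup_keys_foldl_modify_key
    rw [PySem.Dict.keys_empty]; exact List.nodup_nil
  have F3 : ∀ f, inv.getD f [] = grp f := by
    intro f
    have hswap : inv = (c.items.map Prod.swap).foldl
        (fun d p => d.modify p.1 [] (fun v => v ++ [p.2])) PySem.Dict.empty := by
      rw [List.foldl_map]; rfl
    rw [hswap, PySem.Dict.getD_foldl_modify_append]
    have : c.items.map Prod.swap = K.map (fun k => (cnt k, k)) := by
      rw [hitems, List.map_map]; rfl
    rw [this, List.filter_map]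
    have : ((fun p => p.1 == f) ∘ (fun k => ((cnt k : Int), k))) = fun k => cnt k == f := rfl
    rw [this, List.map_map]
    simp only [Function.comp_def]
    rw [hgrp]
    simp
  have F4 : inv.items = (PySem.Set.ofList (K.map cnt)).map (fun f => (f, grp f)) := by
    rw [PySem.Dict.items_eq_map_keys inv F2 [], F1]
    apply List.map_congr_left
    intro f _
    rw [F3 f]
  -- sorting the items of the inverse dict = mapping over the sorted distinct counts
  have F5 : PySem.List.sorted inv.items (fun p => p.1) false = fs.map (fun f => (f, grp f)) := by
    apply PySem.List.sorted_eq_of_perm_of_pairwise_lt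
    · rw [F4]
      exact (PySem.List.sorted_perm _ _ _).map _
    · rw [List.pairwise_map]
      exact hfspw
  rw [F5]
  -- the rebuilt dict has exactly these items
  have F6 : (PySem.Dict.ofList (fs.map (fun f => (f, grp f)))).items = fs.map (fun f => (f, grp f)) := by
    show (List.foldl (fun (acc : PySem.Dict Int (List Int)) (p : Int × List Int) =>
      acc.insert p.1 p.2) PySem.Dict.empty (fs.map (fun f => (f, grp f)))).items =
      fs.map (fun f => (f, grp f))
    rw [PySem.Dict.items_foldl_insert_fresh (fs.map (fun f => (f, grp f)))
      (fun (p : Int × List Int) => p.1) (fun (p : Int × List Int) => p.2) PySem.Dict.empty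
      (fun a _ => by simp [PySem.Dict.contains_empty])
      (by rw [List.map_map]; simpa [Function.comp_def] using hfsnd)]
    rw [show PySem.Dict.empty.items = ([] : List (Int × List Int)) from rfl]
    simp [Function.comp_def]
  rw [F6]
  -- both result loops are flatMaps
  simp only [PySem.List.foldl_append_eq_flatMap, List.nil_append]
  -- B side: keys and counts of the counter
  rw [PySem.Dict.keys_counter]
  have : (fun x => c.getD x 0) = cnt := funext (fun v => PySem.Dict.getD_counter array v)
  rw [this, ← hK]
  -- A side: replicate each element of each bucket
  rw [List.flatMap_map]
  have F8 : fs.flatMap (fun f => (grp f).flatMap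
        (fun n => (PySem.List.pyRange 0 f 1).map (fun _ => n))) =
      fs.flatMap (fun f => (grp f).flatMap (fun n => PySem.List.pyRepeat [n] (cnt n))) := by
    apply pvFlatMapCongr
    intro f _
    apply pvFlatMapCongr
    intro n hn
    have hcn : cnt n = f := by simpa using (List.mem_filter.mp hn).2
    rw [List.map_const', pvLenPyRange, PySem.List.pyRepeat_singleton, hcn]
  rw [F8, ← List.flatMap_assoc, ← pvSortedBuckets K cnt]
  simp only [hcnt, hc, PySem.Dict.getD_counter]

-- ===== VERDICT (by name: the statement is the Claim_ definition above) =====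
theorem freq_sort_spec : Claim_equal_freq_sort := by
  intro array _
  unfold Spec_freq_sort
  exact pvMain array
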